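-- pv_equiv track=rewrite | github.com/juanperez238421-cpu/LMS | src/botgame/training/alphastar/data.py | _ability_from_live_event
-- ===== SOURCE A (Python) =====
-- from typing import Any, Dict, Iterable, List
--
-- _ABILITY_KEY_TO_ID = {
--     "digit1": 1,
--     "digit2": 2,
--     "digit3": 3,
--     "keyr": 4,
-- }
--
-- def _ability_from_live_event(action_name: str, active_keys: Iterable[Any] | None, ability_last: Any) -> int | None:
--     candidates: List[str] = []
--     try:
--         ability_last_s = str(ability_last or "").strip()
--     except Exception:
--         ability_last_s = ""
--     if ability_last_s:
--         candidates.append(ability_last_s)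
--     if active_keys:
--         for key in active_keys:
--             try:
--                 key_s = str(key).strip()
--             except Exception:
--                 continue
--             if key_s:
--                 candidates.append(key_s)
--     if action_name:
--         for key_s in ("Digit1", "Digit2", "Digit3", "KeyR"):
--             if key_s.lower() in action_name.lower():
--                 candidates.append(key_s)
--
--     for key_s in candidates:
--         normalized = str(key_s or "").strip().lower()
--         if normalized in _ABILITY_KEY_TO_ID:
--             return _ABILITY_KEY_TO_ID[normalized]
--     return None
-- ===== SOURCE B (Python) =====
-- # B: no intermediate candidates list — check each source inline and return on the first dict hit.
-- _ABILITY_KEY_TO_ID = {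
--     "digit1": 1,
--     "digit2": 2,
--     "digit3": 3,
--     "keyr": 4,
-- }
--
-- def _ability_from_live_event(action_name, active_keys, ability_last):
--     try:
--         first = str(ability_last or "").strip().lower()
--     except Exception:
--         first = ""
--     hit = _ABILITY_KEY_TO_ID.get(first)
--     if hit is not None:
--         return hit
--     if active_keys:
--         for key in active_keys:
--             try:
--                 k = str(key).strip().lower()
--             except Exception:
--                 continue
--             hit = _ABILITY_KEY_TO_ID.get(k)
--             if hit is not None:
--                 return hit
--     if action_name:
--         an = action_name.lower()
--         for key, aid in _ABILITY_KEY_TO_ID.items():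
--             if key in an:
--                 return aid
--     return None
-- ===== Notes on version B (the rewrite author's own statement) =====
-- stated objective: simpler
-- what changed: B drops A's intermediate candidates list (build-all-then-scan) and instead checks each source inline with early returns: ability_last via one dict lookup, each active key via dict lookup in the loop, and the action_name substring pass iterates the ability table's items directly.
import Mathlib
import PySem

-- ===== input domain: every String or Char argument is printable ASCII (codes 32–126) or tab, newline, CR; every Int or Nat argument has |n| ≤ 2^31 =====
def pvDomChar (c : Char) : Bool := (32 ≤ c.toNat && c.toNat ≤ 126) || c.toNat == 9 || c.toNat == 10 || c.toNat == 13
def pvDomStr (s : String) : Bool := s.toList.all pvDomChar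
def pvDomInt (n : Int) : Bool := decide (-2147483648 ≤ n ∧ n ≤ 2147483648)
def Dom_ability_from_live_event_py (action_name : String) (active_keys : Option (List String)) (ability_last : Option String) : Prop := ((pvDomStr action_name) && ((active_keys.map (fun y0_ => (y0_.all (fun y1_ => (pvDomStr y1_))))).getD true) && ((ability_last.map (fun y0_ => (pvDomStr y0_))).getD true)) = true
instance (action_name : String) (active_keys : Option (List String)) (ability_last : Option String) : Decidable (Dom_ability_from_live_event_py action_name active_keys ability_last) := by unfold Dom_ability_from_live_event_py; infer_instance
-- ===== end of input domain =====

-- B drops A's intermediate candidates list and returns on the first dictionary hit per source (objective: simpler).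
-- Under the type convention keys are Strings, so A's try/except around str(...) can never fire; ports omit it.

-- ===== PORT A =====

-- _ABILITY_KEY_TO_ID
def abilityKeyToId : PySem.Dict String Int :=
  ((((PySem.Dict.empty).insert "digit1" 1).insert "digit2" 2).insert "digit3" 3).insert "keyr" 4

-- A's final loop: 'for key_s in candidates: normalized = str(key_s or "").strip().lower(); if normalized in dict: return dict[normalized]'
-- (str(key_s or "") is the identity on strings: strip "" = "" and lower "" = "" make the k = "" case agree anyway)
def pvScanA : List String → Option Int
  | [] => none
  | k :: rest =>
    let normalized := PySem.Str.lower (PySem.Str.strip k)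
    match abilityKeyToId.get? normalized with
    | some v => some v
    | none => pvScanA rest

def ability_from_live_event_py (action_name : String) (active_keys : Option (List String)) (ability_last : Option String) : Option Int :=
  -- ability_last_s = str(ability_last or "").strip(); 'x or ""' on Option String is getD "" (some "" gives "" either way)
  let ability_last_s := PySem.Str.strip (ability_last.getD "")
  let candidates : List String := if ability_last_s ≠ "" then [ability_last_s] else []
  let candidates := match active_keys with
    | some keys =>
        if keys ≠ [] then
          keys.foldl (fun acc key =>
            let key_s := PySem.Str.strip key
            if key_s ≠ "" then acc ++ [key_s] else acc) candidates
        else candidates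
    | none => candidates
  let candidates := if action_name ≠ "" then
      ["Digit1", "Digit2", "Digit3", "KeyR"].foldl (fun acc key_s =>
        if PySem.Str.isIn (PySem.Str.lower key_s) (PySem.Str.lower action_name) then acc ++ [key_s] else acc) candidates
    else candidates
  pvScanA candidates

-- ===== PORT B =====

-- B's middle loop: normalize each active key and return on the first dict hit
def pvScanKeysB : List String → Option Int
  | [] => none
  | key :: rest =>
    match abilityKeyToId.get? (PySem.Str.lower (PySem.Str.strip key)) with
    | some v => some v
    | none => pvScanKeysB rest

-- B's last loop: 'for key, aid in _ABILITY_KEY_TO_ID.items(): if key in an: return aid'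
def pvScanItemsB : List (String × Int) → String → Option Int
  | [], _ => none
  | (k, aid) :: rest, an => if PySem.Str.isIn k an then some aid else pvScanItemsB rest an

def ability_from_live_event_py_alt (action_name : String) (active_keys : Option (List String)) (ability_last : Option String) : Option Int :=
  let first := PySem.Str.lower (PySem.Str.strip (ability_last.getD ""))
  match abilityKeyToId.get? first with
  | some v => some v
  | none =>
    match (match active_keys with
           | some keys => pvScanKeysB keys
           | none => none) with
    | some v => some v
    | none =>
      if action_name ≠ "" then pvScanItemsB abilityKeyToId.items (PySem.Str.lower action_name)
      else none

-- ===== PRECONDITION & SPEC =====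
def Spec_ability_from_live_event_py (action_name : String) (active_keys : Option (List String)) (ability_last : Option String) (out : Option Int) : Prop := out = ability_from_live_event_py_alt action_name active_keys ability_last
instance (action_name : String) (active_keys : Option (List String)) (ability_last : Option String) (out : Option Int) : Decidable (Spec_ability_from_live_event_py action_name active_keys ability_last out) := by unfold Spec_ability_from_live_event_py; infer_instance

-- ===== CLAIM (what is proved, stated in full; the proofs are below) =====
def Claim_equal_ability_from_live_event_py : Prop := ∀ (action_name : String) (active_keys : Option (List String)) (ability_last : Option String), Dom_ability_from_live_event_py action_name active_keys ability_last → Spec_ability_from_live_event_py action_name active_keys ability_last (ability_from_live_event_py action_name active_keys ability_last)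

-- ===== LEMMAS AND PROOFS =====

-- trimming the already left-trimmed/right-trimmed list again changes nothing
theorem pv_drops (p : Char → Bool) (xs : List Char) :
    List.dropWhile p ((List.dropWhile p ((List.dropWhile p xs).reverse)).reverse)
      = (List.dropWhile p ((List.dropWhile p xs).reverse)).reverse := by
  set a := List.dropWhile p xs with ha
  set b := List.dropWhile p a.reverse with hb
  rcases eq_or_ne b [] with h | h
  · simp [h]
  · rw [List.dropWhile_eq_self_iff]
    intro hlen
    obtain ⟨c, hc⟩ : b <:+ a.reverse := hb ▸ List.dropWhile_suffix p
    have h2 : b.getLast? = (a.reverse).getLast? := by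
      rw [← hc]; exact (List.getLast?_append_of_ne_nil c h).symm
    have ha' : a ≠ [] := by
      intro hnil; rw [hnil] at hc; simp at hc; exact h hc.2
    have h5 : p (a.head ha') = false := List.head_dropWhile_not p ha'
    have e1 : b.reverse.head? = some (a.head ha') := by
      rw [List.head?_reverse, h2]
      simp [List.head?_eq_some_head ha']
    have e2 : b.reverse[0]? = some (a.head ha') := by
      rwa [← List.head?_eq_getElem?]
    have e3 : b.reverse[0] = a.head ha' := by
      have := List.getElem?_eq_getElem hlen
      rw [this] at e2; exact Option.some.inj e2
    simp [e3, h5]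

theorem pv_strip_idem (s : String) : PySem.Str.strip (PySem.Str.strip s) = PySem.Str.strip s := by
  simp [PySem.Str.strip, PySem.Chars.strip, PySem.Chars.lstrip, PySem.Chars.rstrip]
  rw [pv_drops, pv_drops]
  simp

theorem pv_scanA_append (xs ys : List String) :
    pvScanA (xs ++ ys) = (pvScanA xs).or (pvScanA ys) := by
  induction xs with
  | nil => simp [pvScanA]
  | cons k rest ih =>
    simp only [List.cons_append, pvScanA]
    cases abilityKeyToId.get? (PySem.Str.lower (PySem.Str.strip k)) <;> simp [ih]

theorem pv_scanA_keys (keys : List String) (acc : List String) :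
    pvScanA (keys.foldl (fun acc key =>
        let key_s := PySem.Str.strip key
        if key_s ≠ "" then acc ++ [key_s] else acc) acc)
      = (pvScanA acc).or (pvScanKeysB keys) := by
  induction keys generalizing acc with
  | nil => simp [pvScanKeysB]
  | cons key rest ih =>
    simp only [List.foldl_cons, pvScanKeysB]
    rw [ih]
    by_cases hk : PySem.Str.strip key = ""
    · have hget : abilityKeyToId.get? (PySem.Str.lower (PySem.Str.strip key)) = none := by
        rw [hk]; decide
      simp [hk, show abilityKeyToId.get? (PySem.Str.lower "") = none from by decide]
    · have hne : PySem.Str.strip key ≠ "" := hk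
      simp only [if_pos hne, pv_scanA_append]
      have h1 : pvScanA [PySem.Str.strip key]
          = abilityKeyToId.get? (PySem.Str.lower (PySem.Str.strip key)) := by
        simp only [pvScanA, pv_strip_idem]
        cases abilityKeyToId.get? (PySem.Str.lower (PySem.Str.strip key)) <;> rfl
      rw [h1, Option.or_assoc]
      cases abilityKeyToId.get? (PySem.Str.lower (PySem.Str.strip key)) <;> simp

theorem pv_scanA_action (an : String) (acc : List String) :
    pvScanA (["Digit1", "Digit2", "Digit3", "KeyR"].foldl (fun acc key_s =>
        if PySem.Str.isIn (PySem.Str.lower key_s) (PySem.Str.lower an) then acc ++ [key_s] else acc) acc)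
      = (pvScanA acc).or (pvScanItemsB abilityKeyToId.items (PySem.Str.lower an)) := by
  have l1 : PySem.Str.lower "Digit1" = "digit1" := by decide
  have l2 : PySem.Str.lower "Digit2" = "digit2" := by decide
  have l3 : PySem.Str.lower "Digit3" = "digit3" := by decide
  have l4 : PySem.Str.lower "KeyR" = "keyr" := by decide
  have hitems : abilityKeyToId.items = [("digit1",1),("digit2",2),("digit3",3),("keyr",4)] := by decide
  have e1 : pvScanA ["Digit1"] = some 1 := by decide
  have e2 : pvScanA ["Digit2"] = some 2 := by decide
  have e3 : pvScanA ["Digit3"] = some 3 := by decide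
  have e4 : pvScanA ["KeyR"] = some 4 := by decide
  simp only [List.foldl_cons, List.foldl_nil, l1, l2, l3, l4, hitems, pvScanItemsB]
  split_ifs <;>
    (try simp only [pv_scanA_append, Option.or_assoc, e1, e2, e3, e4]) <;>
    cases pvScanA acc <;> rfl

theorem pv_scanA_first (x : String) :
    pvScanA (if PySem.Str.strip x ≠ "" then [PySem.Str.strip x] else [])
      = abilityKeyToId.get? (PySem.Str.lower (PySem.Str.strip x)) := by
  by_cases hx : PySem.Str.strip x = ""
  · rw [hx]; decide
  · have hne : PySem.Str.strip x ≠ "" := hx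
    simp only [if_pos hne, pvScanA, pv_strip_idem]
    cases abilityKeyToId.get? (PySem.Str.lower (PySem.Str.strip x)) <;> rfl

-- ===== VERDICT (by name: the statement is the Claim_ definition above) =====
theorem ability_from_live_event_py_spec : Claim_equal_ability_from_live_event_py := by
  intro action_name active_keys ability_last _
  show ability_from_live_event_py action_name active_keys ability_last
      = ability_from_live_event_py_alt action_name active_keys ability_last
  unfold ability_from_live_event_py ability_from_live_event_py_alt
  simp only []
  set c1 := (if PySem.Str.strip (ability_last.getD "") ≠ "" then [PySem.Str.strip (ability_last.getD "")] else []) with hc1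
  have hfirst := pv_scanA_first (ability_last.getD "")
  rw [← hc1] at hfirst
  -- split on the action_name branch, then on active_keys
  by_cases han : action_name = "" <;>
    rcases active_keys with _ | keys
  · simp only [han, if_neg (by simp : ¬ ("" : String) ≠ "")]
    rw [hfirst]
    cases abilityKeyToId.get? (PySem.Str.lower (PySem.Str.strip (ability_last.getD ""))) <;> simp
  · simp only [han, if_neg (by simp : ¬ ("" : String) ≠ "")]
    rcases eq_or_ne keys ([] : List String) with hk | hk
    · subst hk
      simp only [if_neg (by simp : ¬ ([] : List String) ≠ [])]
      rw [hfirst]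
      cases abilityKeyToId.get? (PySem.Str.lower (PySem.Str.strip (ability_last.getD ""))) <;> simp [pvScanKeysB]
    · simp only [if_pos hk]
      rw [pv_scanA_keys, hfirst]
      cases abilityKeyToId.get? (PySem.Str.lower (PySem.Str.strip (ability_last.getD ""))) <;>
        cases pvScanKeysB keys <;> simp
  · simp only [if_pos (show action_name ≠ "" from han)]
    rw [pv_scanA_action, hfirst]
    cases abilityKeyToId.get? (PySem.Str.lower (PySem.Str.strip (ability_last.getD ""))) <;>
      simp
  · simp only [if_pos (show action_name ≠ "" from han)]
    rcases eq_or_ne keys ([] : List String) with hk | hk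
    · subst hk
      simp only [if_neg (by simp : ¬ ([] : List String) ≠ [])]
      rw [pv_scanA_action, hfirst]
      cases abilityKeyToId.get? (PySem.Str.lower (PySem.Str.strip (ability_last.getD ""))) <;>
        simp [pvScanKeysB]
    · simp only [if_pos hk]
      rw [pv_scanA_action, pv_scanA_keys, hfirst]
      cases abilityKeyToId.get? (PySem.Str.lower (PySem.Str.strip (ability_last.getD ""))) <;>
        cases pvScanKeysB keys <;>
          cases pvScanItemsB abilityKeyToId.items (PySem.Str.lower action_name) <;> simp
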